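-- pv_equiv track=rewrite | github.com/Anshuman-37/DSA_Practice | Queue/Question-28(Hard).py | min_completion_time_round_robin
-- ===== SOURCE A (Python) =====
-- from collections import deque
--
-- def min_completion_time_round_robin(burst_times, time_quantum):
--     n = len(burst_times)
--     remaining_burst_times = list(burst_times)
--     queue = deque(range(n))
--     current_time = 0
--
--     while queue:
--         process_index = queue.popleft()
--         if remaining_burst_times[process_index] > 0:
--             execution_time = min(remaining_burst_times[process_index], time_quantum)
--             current_time += execution_time
--             remaining_burst_times[process_index] -= execution_time
--             if remaining_burst_times[process_index] > 0:
--                 queue.append(process_index)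
--
--     return current_time
-- ===== SOURCE B (Python) =====
-- def min_completion_time_round_robin(burst_times, time_quantum):
--     return sum(b for b in burst_times if b > 0)
-- ===== Notes on version B (the rewrite author's own statement) =====
-- stated objective: faster
-- what changed: Replaces the queue-based round-robin simulation with a direct one-pass sum of the positive burst times, which equals the total completion time.
import Mathlib
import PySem

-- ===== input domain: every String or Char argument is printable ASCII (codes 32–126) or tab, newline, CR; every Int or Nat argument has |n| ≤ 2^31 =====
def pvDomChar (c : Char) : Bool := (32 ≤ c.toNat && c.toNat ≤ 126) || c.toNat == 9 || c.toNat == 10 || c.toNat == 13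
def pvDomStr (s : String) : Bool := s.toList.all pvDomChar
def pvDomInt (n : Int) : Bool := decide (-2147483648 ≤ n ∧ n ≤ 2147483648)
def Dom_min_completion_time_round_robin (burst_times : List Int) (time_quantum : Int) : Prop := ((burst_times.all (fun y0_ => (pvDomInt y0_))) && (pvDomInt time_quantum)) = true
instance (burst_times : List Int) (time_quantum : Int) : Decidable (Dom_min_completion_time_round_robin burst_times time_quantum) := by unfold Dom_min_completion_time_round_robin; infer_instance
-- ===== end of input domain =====

-- B replaces the round-robin simulation by a one-pass sum of the positive burst times (asymptotically faster).

-- ===== PORT A =====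
-- The while loop, step for step: pop the queue head, run min(remaining, quantum),
-- re-queue if work remains.  The fuel argument only makes the recursion total: under
-- Pre_ (quantum > 0, or no positive burst) it is large enough never to run out, so the
-- loop ends exactly as Python's does (empty queue).  Indexing uses getD 0, exact here
-- because every queued index comes from range n and the list length never changes.
def rrLoop (tq : Int) : Nat → List Int → List Nat → Int → Int
  | 0, _, _, cur => cur
  | _ + 1, _, [], cur => cur
  | fuel + 1, rem, i :: q, cur =>
    let b := rem.getD i 0
    if b > 0 then
      let e := min b tq
      let rem' := rem.set i (b - e)
      if b - e > 0 then rrLoop tq fuel rem' (q ++ [i]) (cur + e)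
      else rrLoop tq fuel rem' q (cur + e)
    else rrLoop tq fuel rem q cur

def min_completion_time_round_robin (burst_times : List Int) (time_quantum : Int) : Int :=
  let n := burst_times.length
  let fuel := ((n : Int) + burst_times.foldl (fun s b => s + max b 0) 0).toNat + 1
  rrLoop time_quantum fuel burst_times (List.range n) 0

-- ===== PORT B =====
def min_completion_time_round_robin_alt (burst_times : List Int) (time_quantum : Int) : Int :=
  burst_times.foldl (fun s b => if b > 0 then s + b else s) 0

-- ===== PRECONDITION & SPEC =====
-- Pre_ excludes exactly the inputs on which Python A never returns: a non-positive
-- quantum together with some positive burst makes the remaining time grow each round,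
-- so the while loop runs forever.
def Pre_min_completion_time_round_robin (burst_times : List Int) (time_quantum : Int) : Prop :=
  0 < time_quantum ∨ ∀ b ∈ burst_times, b ≤ 0
instance (burst_times : List Int) (time_quantum : Int) : Decidable (Pre_min_completion_time_round_robin burst_times time_quantum) := by unfold Pre_min_completion_time_round_robin; infer_instance

def pvWitness_min_completion_time_round_robin : List Int × Int := ([4, 0, 7, 2], 3)

def Spec_min_completion_time_round_robin (burst_times : List Int) (time_quantum : Int) (out : Int) : Prop := out = min_completion_time_round_robin_alt burst_times time_quantum
instance (burst_times : List Int) (time_quantum : Int) (out : Int) : Decidable (Spec_min_completion_time_round_robin burst_times time_quantum out) := by unfold Spec_min_completion_time_round_robin; infer_instance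

-- ===== CLAIM (what is proved, stated in full; the proofs are below) =====
def Claim_equal_min_completion_time_round_robin : Prop := ∀ (burst_times : List Int) (time_quantum : Int), Dom_min_completion_time_round_robin burst_times time_quantum → Pre_min_completion_time_round_robin burst_times time_quantum → Spec_min_completion_time_round_robin burst_times time_quantum (min_completion_time_round_robin burst_times time_quantum)

-- ===== LEMMAS AND PROOFS =====

-- positive part of the remaining work still referenced by the queue
def posSum (rem : List Int) (q : List Nat) : Int :=
  (q.map (fun i => max (rem.getD i 0) 0)).sum

lemma posSum_nonneg (rem : List Int) (q : List Nat) : 0 ≤ posSum rem q := by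
  induction q with
  | nil => simp [posSum]
  | cons i q ih =>
    simp only [posSum, List.map_cons, List.sum_cons] at *
    have : (0 : Int) ≤ max (rem.getD i 0) 0 := le_max_right _ _
    omega

lemma posSum_set_notMem (rem : List Int) (i : Nat) (v : Int) (q : List Nat)
    (h : i ∉ q) : posSum (rem.set i v) q = posSum rem q := by
  unfold posSum
  congr 1
  apply List.map_congr_left
  intro j hj
  have hne : i ≠ j := fun e => h (e ▸ hj)
  simp [List.getD, List.getElem?_set_ne hne]

lemma posSum_append (rem : List Int) (q : List Nat) (i : Nat) :
    posSum rem (q ++ [i]) = posSum rem q + max (rem.getD i 0) 0 := by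
  simp [posSum]

-- main invariant: with a positive quantum and enough fuel, the loop adds exactly
-- the positive remaining work of the queued (distinct, in-range) indices
lemma rrLoop_eq (tq : Int) (htq : 0 < tq) :
    ∀ (fuel : Nat) (rem : List Int) (q : List Nat) (cur : Int),
      q.Nodup → (∀ i ∈ q, i < rem.length) →
      q.length + (posSum rem q).toNat < fuel →
      rrLoop tq fuel rem q cur = cur + posSum rem q := by
  intro fuel
  induction fuel with
  | zero => intro rem q cur _ _ hf; omega
  | succ fuel ih =>
    intro rem q cur hnd hlt hf
    match q with
    | [] => simp [rrLoop, posSum]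
    | i :: q =>
      have hiq : i ∉ q := (List.nodup_cons.mp hnd).1
      have hndq : q.Nodup := (List.nodup_cons.mp hnd).2
      have hilen : i < rem.length := hlt i (by simp)
      have hgetD : rem.getD i 0 = rem[i] := by
        simp [List.getD, List.getElem?_eq_getElem hilen]
      have hpos : posSum rem (i :: q) = max (rem.getD i 0) 0 + posSum rem q := by
        simp [posSum]
      have hS : 0 ≤ posSum rem q := posSum_nonneg rem q
      simp only [rrLoop]
      by_cases hb : rem.getD i 0 > 0
      · simp only [hb, if_true]
        set b := rem.getD i 0 with hbdef
        obtain ⟨e, hE⟩ : ∃ e, min b tq = e := ⟨_, rfl⟩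
        rw [hE]
        have hmaxb : max b 0 = b := by omega
        have he1 : 1 ≤ e := by rw [← hE]; exact le_min (by omega) (by omega)
        have heb : e ≤ b := hE ▸ min_le_left _ _
        have heor : e = b ∨ e = tq := hE ▸ min_choice _ _
        have hset_len : (rem.set i (b - e)).length = rem.length := by simp
        have hgetDset : (rem.set i (b - e)).getD i 0 = b - e := by
          simp [List.getD, hilen, hbdef]
        by_cases hre : b - e > 0
        · simp only [hre, if_true]
          have hbound : (q ++ [i]).length + (posSum (rem.set i (b - e)) (q ++ [i])).toNat < fuel := by
            rw [posSum_append, posSum_set_notMem _ _ _ _ hiq, hgetDset]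
            rw [hpos, hmaxb] at hf
            have h1 : (q ++ [i]).length = q.length + 1 := by simp
            have h2 : max (b - e) 0 = b - e := by omega
            rw [h1, h2]
            simp only [List.length_cons] at hf
            omega
          have hnd2 : (q ++ [i]).Nodup := by
            refine List.Nodup.append hndq (List.nodup_singleton i) ?_
            intro a ha hb
            rw [List.mem_singleton] at hb
            exact hiq (hb ▸ ha)
          have hlt2 : ∀ j ∈ q ++ [i], j < (rem.set i (b - e)).length := by
            intro j hj
            rw [hset_len]
            rcases List.mem_append.mp hj with h | h
            · exact hlt j (List.mem_cons_of_mem _ h)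
            · simp at h; subst h; exact hilen
          rw [ih _ _ _ hnd2 hlt2 hbound]
          rw [posSum_append, posSum_set_notMem _ _ _ _ hiq, hgetDset, hpos, hmaxb]
          have : max (b - e) 0 = b - e := by omega
          rw [this]; ring
        · simp only [hre, if_false]
          have heeq : e = b := by omega
          have hbound : q.length + (posSum (rem.set i (b - e)) q).toNat < fuel := by
            rw [posSum_set_notMem _ _ _ _ hiq]
            rw [hpos, hmaxb] at hf
            simp only [List.length_cons] at hf
            omega
          rw [ih _ _ _ hndq
              (by intro j hj; rw [hset_len]; exact hlt j (List.mem_cons_of_mem _ hj))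
              hbound]
          rw [posSum_set_notMem _ _ _ _ hiq, hpos, hmaxb, heeq]; ring
      · simp only [hb, if_false]
        have hbound : q.length + (posSum rem q).toNat < fuel := by
          rw [hpos] at hf
          have : max (rem.getD i 0) 0 = 0 := by omega
          rw [this] at hf
          simp only [List.length_cons] at hf
          omega
        rw [ih _ _ _ hndq (fun j hj => hlt j (List.mem_cons_of_mem _ hj)) hbound,
            hpos]
        have : max (rem.getD i 0) 0 = 0 := by omega
        omega

-- with no positive remaining work in the queue the loop only drains it
lemma rrLoop_nonpos (tq : Int) :
    ∀ (fuel : Nat) (rem : List Int) (q : List Nat) (cur : Int),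
      (∀ i ∈ q, rem.getD i 0 ≤ 0) →
      rrLoop tq fuel rem q cur = cur := by
  intro fuel
  induction fuel with
  | zero => intro rem q cur _; rfl
  | succ fuel ih =>
    intro rem q cur h
    match q with
    | [] => rfl
    | i :: q =>
      have : ¬ rem.getD i 0 > 0 := by have := h i (by simp); omega
      simp only [rrLoop, this, if_false]
      exact ih rem q cur (fun j hj => h j (List.mem_cons_of_mem _ hj))

lemma map_range_getD (bt : List Int) (f : Int → Int) :
    (List.range bt.length).map (fun i => f (bt.getD i 0)) = bt.map f := by
  apply List.ext_getElem
  · simp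
  · intro i h1 h2
    simp only [List.getElem_map, List.getElem_range]
    congr 1
    simp only [List.length_map, List.length_range] at h1 h2
    simp [List.getD, List.getElem?_eq_getElem h2]

lemma foldl_max (bt : List Int) :
    ∀ s, bt.foldl (fun s b => s + max b 0) s = s + (bt.map (fun b => max b 0)).sum := by
  induction bt with
  | nil => intro s; simp
  | cons b bt ih =>
    intro s
    simp only [List.foldl_cons, List.map_cons, List.sum_cons, ih]
    ring

lemma alt_eq_sum (bt : List Int) (tq : Int) :
    min_completion_time_round_robin_alt bt tq = (bt.map (fun b => max b 0)).sum := by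
  unfold min_completion_time_round_robin_alt
  have : ∀ s, bt.foldl (fun s b => if b > 0 then s + b else s) s
      = s + (bt.map (fun b => max b 0)).sum := by
    induction bt with
    | nil => intro s; simp
    | cons b bt ih =>
      intro s
      simp only [List.foldl_cons, List.map_cons, List.sum_cons, ih]
      by_cases h : b > 0
      · have : max b 0 = b := by omega
        simp [h, this]; ring
      · have : max b 0 = 0 := by omega
        simp [h, this]
  simpa using this 0

-- ===== VERDICT (by name: the statement is the Claim_ definition above) =====
theorem min_completion_time_round_robin_spec : Claim_equal_min_completion_time_round_robin := by
  intro bt tq _hdom hpre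
  unfold Spec_min_completion_time_round_robin
  rw [alt_eq_sum]
  unfold min_completion_time_round_robin
  rcases hpre with htq | hall
  · have hps : posSum bt (List.range bt.length) = (bt.map (fun b => max b 0)).sum := by
      unfold posSum
      rw [map_range_getD bt (fun b => max b 0)]
    rw [rrLoop_eq tq htq _ bt (List.range bt.length) 0 (List.nodup_range)
        (by intro i hi; exact List.mem_range.mp hi)
        (by rw [hps, foldl_max bt 0]
            have hnn : 0 ≤ (bt.map (fun b => max b 0)).sum := by
              apply List.sum_nonneg
              intro x hx
              obtain ⟨b, _, rfl⟩ := List.mem_map.mp hx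
              exact le_max_right _ _
            simp only [List.length_range]
            omega)]
    rw [hps]; ring
  · rw [rrLoop_nonpos tq _ bt (List.range bt.length) 0
        (by intro i hi
            by_cases h : i < bt.length
            · have : bt.getD i 0 = bt[i] := by
                simp [List.getD, List.getElem?_eq_getElem h]
              rw [this]
              exact hall _ (List.getElem_mem h)
            · simp [List.getD, List.getElem?_eq_none (by omega : bt.length ≤ i)])]
    have : (bt.map (fun b => max b 0)).sum = 0 := by
      apply List.sum_eq_zero
      intro x hx
      obtain ⟨b, hb, rfl⟩ := List.mem_map.mp hx
      have := hall b hb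
      omega
    omega
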